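-- pv_equiv track=rewrite | github.com/bytebutcher/pydfql | pydictdisplayfilter/helpers.py | calculate
-- ===== SOURCE A (Python) =====
-- from collections import OrderedDict
-- from typing import List, Dict, Callable
--
-- def calculate(data_store: List[dict], fields: List) -> List[int]:
--     """ Calculates and returns the necessary size of each column in the data store. """
--     field_sizes = OrderedDict()
--     for field in fields:
--         field_sizes[field] = len(field)
--     for item in data_store:
--         for key in field_sizes.keys():
--             if key in item:
--                 field_sizes[key] = max(len(str(item[key])), field_sizes[key])
--     return list(field_sizes.values())
-- ===== SOURCE B (Python) =====
-- from collections import OrderedDict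
--
-- def calculate(data_store, fields):
--     """ Calculates and returns the necessary size of each column in the data store. """
--     return [
--         max([len(f)] + [len(str(item[f])) for item in data_store if f in item])
--         for f in OrderedDict.fromkeys(fields)
--     ]
-- ===== Notes on version B (the rewrite author's own statement) =====
-- stated objective: simpler
-- what changed: Replaces A's item-major sweep that threads a running-max OrderedDict through all rows with a field-major one-liner: dedup the fields once, then compute each column width independently as max(len(field), lengths of its values) in a per-field comprehension.
import Mathlib
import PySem

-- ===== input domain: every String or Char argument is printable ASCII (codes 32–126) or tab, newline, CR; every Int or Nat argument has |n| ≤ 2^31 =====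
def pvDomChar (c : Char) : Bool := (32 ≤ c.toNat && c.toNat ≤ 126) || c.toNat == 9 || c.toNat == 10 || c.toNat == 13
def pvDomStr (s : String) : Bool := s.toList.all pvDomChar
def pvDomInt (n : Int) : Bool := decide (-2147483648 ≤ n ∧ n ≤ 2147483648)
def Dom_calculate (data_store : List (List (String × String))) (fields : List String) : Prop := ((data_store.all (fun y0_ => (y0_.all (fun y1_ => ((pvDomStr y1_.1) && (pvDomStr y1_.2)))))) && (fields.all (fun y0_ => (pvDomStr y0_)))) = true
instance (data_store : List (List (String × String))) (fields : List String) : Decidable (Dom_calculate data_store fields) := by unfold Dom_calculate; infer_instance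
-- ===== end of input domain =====

-- B is a simpler field-major rewrite: dedup the fields once, then compute each column's
-- width independently as a max over the items, instead of threading a running-max dict
-- through an item-major sweep.  Proved equal to A on all inputs.

-- ===== PORT A =====
-- shared representation helper: a data-store item is a Python dict, arriving here as an
-- association list; Python dict construction keeps the first position and the last value.
def itemGet? (item : List (String × String)) (k : String) : Option String :=
  (PySem.Dict.ofList item).get? k

-- the first loop of A: field_sizes[field] = len(field) for field in fields
def calcInit (fields : List String) : PySem.Dict String Int :=
  fields.foldl (fun d f => d.insert f (PySem.Str.len f : Int)) PySem.Dict.empty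

-- the inner loop of A: for key in field_sizes.keys(): if key in item: …
def calcStep (item : List (String × String)) (d : PySem.Dict String Int) : PySem.Dict String Int :=
  d.keys.foldl (fun d' k =>
    match itemGet? item k with
    | some v => d'.insert k (max (PySem.Str.len v : Int) (d'.getD k 0))
    | none => d') d

def calculate (data_store : List (List (String × String))) (fields : List String) : List Int :=
  (data_store.foldl (fun d item => calcStep item d) (calcInit fields)).values

-- ===== PORT B =====
def calculate_alt (data_store : List (List (String × String))) (fields : List String) : List Int :=
  (PySem.List.dedup fields).map (fun f =>
    (data_store.filterMap (fun item => (itemGet? item f).map (fun v => (PySem.Str.len v : Int)))).foldl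
      (fun a b => max a b) (PySem.Str.len f : Int))

-- ===== PRECONDITION & SPEC =====
def Spec_calculate (data_store : List (List (String × String))) (fields : List String) (out : List Int) : Prop := out = calculate_alt data_store fields
instance (data_store : List (List (String × String))) (fields : List String) (out : List Int) : Decidable (Spec_calculate data_store fields out) := by unfold Spec_calculate; infer_instance

-- ===== CLAIM (what is proved, stated in full; the proofs are below) =====
def Claim_equal_calculate : Prop := ∀ (data_store : List (List (String × String))) (fields : List String), Dom_calculate data_store fields → Spec_calculate data_store fields (calculate data_store fields)

-- ===== LEMMAS AND PROOFS =====

-- the per-key reduction B performs, in item-major form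
def colFold (data_store : List (List (String × String))) (k : String) (a : Int) : Int :=
  data_store.foldl (fun a item =>
    match itemGet? item k with
    | some v => max (PySem.Str.len v : Int) a
    | none => a) a

-- calcInit: lookup
theorem get?_calcInit_fold (fields : List String) (d : PySem.Dict String Int) (k : String) :
    (fields.foldl (fun d f => d.insert f (PySem.Str.len f : Int)) d).get? k =
      if k ∈ fields then some (PySem.Str.len k : Int) else d.get? k := by
  induction fields generalizing d with
  | nil => simp
  | cons f fs ih =>
    simp only [List.foldl_cons, ih, List.mem_cons]
    by_cases hk : k ∈ fs
    · simp [hk]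
    · by_cases he : k = f
      · subst he; simp [hk, PySem.Dict.get?_insert_self]
      · simp [hk, he, PySem.Dict.get?_insert_of_ne d _ he]

-- calcInit: keys
theorem keys_insert_set_add (d : PySem.Dict String Int) (k : String) (v : Int) :
    (d.insert k v).keys = PySem.Set.add d.keys k := by
  by_cases h : d.contains k = true
  · rw [PySem.Dict.keys_insert_of_contains d v h]
    have : k ∈ d.keys := (PySem.Dict.contains_iff_mem_keys d k).1 h
    simp [PySem.Set.add, PySem.Set.contains, this]
  · rw [PySem.Dict.keys_insert_of_not_contains d v (by simpa using h)]
    have : k ∉ d.keys := fun hm => h ((PySem.Dict.contains_iff_mem_keys d k).2 hm)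
    simp [PySem.Set.add, PySem.Set.contains, this]

theorem keys_calcInit_fold (fields : List String) (d : PySem.Dict String Int) :
    (fields.foldl (fun d f => d.insert f (PySem.Str.len f : Int)) d).keys =
      PySem.Set.update d.keys fields := by
  induction fields generalizing d with
  | nil => rfl
  | cons f fs ih =>
    simp only [List.foldl_cons, ih, keys_insert_set_add]
    rfl

theorem keys_calcInit (fields : List String) :
    (calcInit fields).keys = PySem.List.dedup fields := by
  rw [calcInit, keys_calcInit_fold, PySem.List.dedup_eq_ofList]
  rfl

theorem nodup_keys_calcInit (fields : List String) : (calcInit fields).keys.Nodup := by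
  rw [keys_calcInit]; exact PySem.List.nodup_dedup fields

-- calcStep preserves keys
theorem keys_calcInner (item : List (String × String)) (ks : List String)
    (d : PySem.Dict String Int) (h : ∀ k ∈ ks, k ∈ d.keys) :
    (ks.foldl (fun d' k =>
      match itemGet? item k with
      | some v => d'.insert k (max (PySem.Str.len v : Int) (d'.getD k 0))
      | none => d') d).keys = d.keys := by
  induction ks generalizing d with
  | nil => rfl
  | cons k ks ih =>
    simp only [List.foldl_cons]
    cases hv : itemGet? item k with
    | none =>
      exact ih d (fun x hx => h x (List.mem_cons_of_mem _ hx))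
    | some v =>
      have hk : k ∈ d.keys := h k List.mem_cons_self
      have hkeys : (d.insert k (max (PySem.Str.len v : Int) (d.getD k 0))).keys = d.keys :=
        PySem.Dict.keys_insert_of_contains d _ ((PySem.Dict.contains_iff_mem_keys d k).2 hk)
      rw [ih _ (fun x hx => by rw [hkeys]; exact h x (List.mem_cons_of_mem _ hx)), hkeys]

theorem keys_calcStep (item : List (String × String)) (d : PySem.Dict String Int) :
    (calcStep item d).keys = d.keys :=
  keys_calcInner item d.keys d (fun _ hx => hx)

-- calcStep: inner fold leaves keys outside ks untouched
theorem getD_calcInner_not_mem (item : List (String × String)) (ks : List String)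
    (d : PySem.Dict String Int) (k : String) (h : k ∉ ks) :
    (ks.foldl (fun d' k =>
      match itemGet? item k with
      | some v => d'.insert k (max (PySem.Str.len v : Int) (d'.getD k 0))
      | none => d') d).getD k 0 = d.getD k 0 := by
  induction ks generalizing d with
  | nil => rfl
  | cons k' ks ih =>
    have hne : k ≠ k' := fun he => h (he ▸ List.mem_cons_self)
    have hks : k ∉ ks := fun hm => h (List.mem_cons_of_mem _ hm)
    simp only [List.foldl_cons]
    cases hv : itemGet? item k' with
    | none => exact ih d hks
    | some v =>
      rw [ih _ hks, PySem.Dict.getD_insert_of_ne d _ _ hne]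

-- calcStep: pointwise effect
theorem getD_calcStep (item : List (String × String)) (d : PySem.Dict String Int) (k : String)
    (hk : k ∈ d.keys) (hnd : d.keys.Nodup) :
    (calcStep item d).getD k 0 =
      match itemGet? item k with
      | some v => max (PySem.Str.len v : Int) (d.getD k 0)
      | none => d.getD k 0 := by
  rw [calcStep]
  have main : ∀ (ks : List String) (d' : PySem.Dict String Int), ks.Nodup → k ∈ ks →
      (ks.foldl (fun d' k =>
        match itemGet? item k with
        | some v => d'.insert k (max (PySem.Str.len v : Int) (d'.getD k 0))
        | none => d') d').getD k 0 =
        match itemGet? item k with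
        | some v => max (PySem.Str.len v : Int) (d'.getD k 0)
        | none => d'.getD k 0 := by
    intro ks
    induction ks with
    | nil => intro d' _ hm; cases hm
    | cons k' ks ih =>
      intro d' hnd' hm
      simp only [List.foldl_cons]
      rcases List.mem_cons.1 hm with he | hm'
      · subst he
        have hknotin : k ∉ ks := (List.nodup_cons.1 hnd').1
        cases hv : itemGet? item k with
        | none => rw [getD_calcInner_not_mem item ks d' k hknotin]
        | some v =>
          rw [getD_calcInner_not_mem item ks _ k hknotin, PySem.Dict.getD_insert_self]
      · have hne : k ≠ k' := fun he => (List.nodup_cons.1 hnd').1 (he ▸ hm')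
        cases hv : itemGet? item k' with
        | none => exact ih d' (List.nodup_cons.1 hnd').2 hm'
        | some v =>
          rw [ih _ (List.nodup_cons.1 hnd').2 hm', PySem.Dict.getD_insert_of_ne d' _ _ hne]
  exact main d.keys d hnd hk

-- values of a dict with nodup keys
theorem values_eq_map_getD (d : PySem.Dict String Int) (h : d.keys.Nodup) :
    d.values = d.keys.map (fun k => d.getD k 0) := by
  obtain ⟨ps⟩ := d
  induction ps with
  | nil => rfl
  | cons p rest ih =>
    obtain ⟨k, v⟩ := p
    rw [PySem.Dict.keys_mk] at h
    simp only [List.map_cons, List.nodup_cons] at h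
    rw [PySem.Dict.values_mk, PySem.Dict.keys_mk]
    simp only [List.map_cons]
    have hke : PySem.Dict.getD ⟨(k, v) :: rest⟩ k 0 = v := by
      simp [PySem.Dict.getD, PySem.Dict.get?_mk_cons]
    rw [hke]
    congr 1
    · rw [List.map_congr_left (l := List.map (fun x => x.1) rest)
        (f := fun k1 => PySem.Dict.getD ⟨(k, v) :: rest⟩ k1 0)
        (g := fun k1 => PySem.Dict.getD ⟨rest⟩ k1 0)
        (fun k1 hk1 => by
          have hne : ¬(k = k1) := fun he => h.1 (he ▸ hk1)
          simp [PySem.Dict.getD, PySem.Dict.get?_mk_cons, hne])]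
      have h2 := ih (by rw [PySem.Dict.keys_mk]; exact h.2)
      rw [PySem.Dict.values_mk, PySem.Dict.keys_mk] at h2
      exact h2

-- outer fold: keys preserved
theorem keys_calcLoop (data_store : List (List (String × String))) (d : PySem.Dict String Int) :
    (data_store.foldl (fun d item => calcStep item d) d).keys = d.keys := by
  induction data_store generalizing d with
  | nil => rfl
  | cons item items ih => rw [List.foldl_cons, ih, keys_calcStep]

theorem nodup_keys_calcLoop (data_store : List (List (String × String))) (d : PySem.Dict String Int)
    (h : d.keys.Nodup) :
    (data_store.foldl (fun d item => calcStep item d) d).keys.Nodup := by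
  simp [keys_calcLoop, h]

-- outer fold, pointwise
theorem getD_calcLoop (data_store : List (List (String × String))) (d : PySem.Dict String Int)
    (k : String) (hk : k ∈ d.keys) (hnd : d.keys.Nodup) :
    (data_store.foldl (fun d item => calcStep item d) d).getD k 0 =
      colFold data_store k (d.getD k 0) := by
  induction data_store generalizing d with
  | nil => rfl
  | cons item items ih =>
    rw [List.foldl_cons]
    rw [ih (calcStep item d) (by rw [keys_calcStep]; exact hk) (by rw [keys_calcStep]; exact hnd)]
    rw [getD_calcStep item d k hk hnd]
    rw [colFold, colFold, List.foldl_cons]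

-- item-major per-key fold = B's filterMap-then-max fold
theorem colFold_eq_filterMap (data_store : List (List (String × String))) (k : String) (a : Int) :
    colFold data_store k a =
      (data_store.filterMap (fun item => (itemGet? item k).map (fun v => (PySem.Str.len v : Int)))).foldl
        (fun a b => max a b) a := by
  induction data_store generalizing a with
  | nil => rfl
  | cons item items ih =>
    rw [colFold, List.foldl_cons, List.filterMap_cons]
    cases hv : itemGet? item k with
    | none => simpa [colFold] using ih a
    | some v =>
      simp only [Option.map_some, List.foldl_cons]
      rw [← colFold, ih, max_comm]

-- ===== VERDICT (by name: the statement is the Claim_ definition above) =====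
theorem calculate_spec : Claim_equal_calculate := by
  intro data_store fields _
  unfold Spec_calculate calculate calculate_alt
  have hnd := nodup_keys_calcInit fields
  rw [values_eq_map_getD _ (nodup_keys_calcLoop _ _ hnd), keys_calcLoop]
  rw [keys_calcInit]
  apply List.map_congr_left
  intro k hk
  rw [getD_calcLoop data_store (calcInit fields) k (by rw [keys_calcInit]; exact hk) hnd,
      colFold_eq_filterMap]
  congr 1
  have hkf : k ∈ fields := (PySem.List.mem_dedup fields k).1 hk
  have h1 : (calcInit fields).get? k = some (PySem.Str.len k : Int) := by
    rw [calcInit, get?_calcInit_fold]; simp [hkf]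
  rw [PySem.Dict.getD_eq_get?_getD, h1]
  rfl
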